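-- pv_equiv track=rewrite | github.com/ahnhongjo/CodingTest | 코딩테스트_파이썬/라인 공채/프로그래밍1.py | solution
-- ===== SOURCE A (Python) =====
-- def solution(table, languages, preference):
--     table_list=[]
--     for lang in table:
--         tmp=list(map(str,lang.split(" ")))
--         table_list.append(tmp)
--
--     score=[]
--
--     for lang in table_list:
--         job=lang[0]
--         job_score=0
--         for i in range(len(languages)):
--             if languages[i] in lang:
--                 lang_score=6-lang.index(languages[i])
--                 job_score+=lang_score*preference[i]
--
--         score.append((job,job_score))
--
--     score=sorted(score,key=lambda x:(-x[1],x[0]))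
--
--     answer = score[0][0]
--     return answer
-- ===== SOURCE B (Python) =====
-- def solution(table, languages, preference):
--     # one-pass argmax over the rows (strict '>' on score, '<' on job name for ties)
--     # instead of building a score list and sorting it
--     best = None
--     for row in table:
--         words = row.split(" ")
--         job = words[0]
--         s = 0
--         for lang, pref in zip(languages, preference):
--             if lang in words:
--                 s += (6 - words.index(lang)) * pref
--         if best is None or s > best[1] or (s == best[1] and job < best[0]):
--             best = (job, s)
--     return best[0]
-- ===== Notes on version B (the rewrite author's own statement) =====
-- stated objective: simpler
-- what changed: B selects the winning job in a single pass with a running (best_job, best_score) argmax (strict '>' on score, '<' on name for ties) and iterates zip(languages, preference), instead of accumulating a full (job, score) list and sorting it by (-score, job) to take the first element.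
-- crash fix: When table is non-empty and some language at an index >= len(preference) occurs in a row, A raises IndexError on preference[i]; B ignores languages beyond the preference list (zip truncates) and returns the argmax job. — e.g. on solution(["a b"], ["b"], []): A raises IndexError, B returns "a"
import Mathlib
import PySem

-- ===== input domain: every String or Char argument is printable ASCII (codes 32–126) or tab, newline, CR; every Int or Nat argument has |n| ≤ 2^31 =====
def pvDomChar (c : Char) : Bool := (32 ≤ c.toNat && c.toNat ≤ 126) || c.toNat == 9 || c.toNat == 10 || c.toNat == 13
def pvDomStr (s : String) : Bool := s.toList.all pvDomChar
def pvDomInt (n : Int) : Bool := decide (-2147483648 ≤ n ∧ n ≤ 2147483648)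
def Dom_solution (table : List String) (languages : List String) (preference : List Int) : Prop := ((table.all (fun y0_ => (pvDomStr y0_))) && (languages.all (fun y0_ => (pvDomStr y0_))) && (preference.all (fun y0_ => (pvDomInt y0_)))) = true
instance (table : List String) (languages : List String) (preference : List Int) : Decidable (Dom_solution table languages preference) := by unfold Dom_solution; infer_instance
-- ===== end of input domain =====

-- B replaces A's build-score-list-then-sort-by-(-score,name) with a single-pass running argmax; same value, simpler.

-- shared Python primitive: row.split(" ")  (sep is nonempty, so split? never returns none)
def pvSplit (row : String) : List String := (PySem.Str.split? row " ").getD []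

-- ===== PORT A =====
def solution (table : List String) (languages : List String) (preference : List Int) : String :=
  let table_list := table.foldl (fun acc lang => acc ++ [pvSplit lang]) []
  let score := table_list.foldl (fun sc (lang : List String) =>
    let job := (PySem.List.pyGet? lang 0).getD ""
    let job_score := (PySem.List.pyRange 0 (languages.length : Int) 1).foldl (fun js i =>
      let l := PySem.List.pyGetD languages i ""
      if lang.contains l then
        js + (6 - ((PySem.List.index? lang l).getD 0 : Int)) * PySem.List.pyGetD preference i 0
      else js) 0
    sc ++ [(job, job_score)]) []
  let score' := PySem.List.sorted2 score (fun x => -x.2) (fun x => x.1)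
  ((PySem.List.pyGet? score' 0).getD ("", 0)).1

-- ===== PORT B =====
def solution_alt (table : List String) (languages : List String) (preference : List Int) : String :=
  let best := table.foldl (fun (best : Option (String × Int)) (row : String) =>
    let words := pvSplit row
    let job := (PySem.List.pyGet? words 0).getD ""
    let s := (languages.zip preference).foldl (fun acc (lp : String × Int) =>
      if words.contains lp.1 then
        acc + (6 - ((PySem.List.index? words lp.1).getD 0 : Int)) * lp.2
      else acc) 0
    match best with
    | none => some (job, s)
    | some b => if s > b.2 ∨ (s = b.2 ∧ job < b.1) then some (job, s) else some b) none
  (best.getD ("", 0)).1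

-- ===== PRECONDITION & SPEC =====
-- Pre_ = exactly the inputs where Python A returns: A raises IndexError on score[0] when table is
-- empty, and on preference[i] when a language at an index ≥ len(preference) occurs in some row.
def Pre_solution (table : List String) (languages : List String) (preference : List Int) : Prop :=
  table ≠ [] ∧ ∀ l ∈ languages.drop preference.length, ∀ row ∈ table, l ∉ pvSplit row
instance (table : List String) (languages : List String) (preference : List Int) : Decidable (Pre_solution table languages preference) := by unfold Pre_solution; infer_instance

def pvWitness_solution : List String × List String × List Int :=
  (["java backend", "py data"], ["java", "py"], [3, 2])

-- When table is non-empty and some language at an index >= len(preference) occurs in a row, A raises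
-- IndexError on preference[i]; B ignores languages beyond the preference list and returns the argmax job.
def Raises_solution (table : List String) (languages : List String) (preference : List Int) : Prop :=
  table ≠ [] ∧ ∃ l ∈ languages.drop preference.length, ∃ row ∈ table, l ∈ pvSplit row
instance (table : List String) (languages : List String) (preference : List Int) : Decidable (Raises_solution table languages preference) := by unfold Raises_solution; infer_instance
def pvRaiseWitness_solution : List String × List String × List Int := (["a b"], ["b"], [])
def pvRaiseWitnessOut_solution : String := "a"

def Spec_solution (table : List String) (languages : List String) (preference : List Int) (out : String) : Prop := out = solution_alt table languages preference
instance (table : List String) (languages : List String) (preference : List Int) (out : String) : Decidable (Spec_solution table languages preference out) := by unfold Spec_solution; infer_instance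

-- ===== CLAIM (what is proved, stated in full; the proofs are below) =====
def Claim_equal_solution : Prop := ∀ (table : List String) (languages : List String) (preference : List Int), Dom_solution table languages preference → Pre_solution table languages preference → Spec_solution table languages preference (solution table languages preference)
def Claim_raises_solution : Prop := (∀ (table : List String) (languages : List String) (preference : List Int), Dom_solution table languages preference → Raises_solution table languages preference → ¬ Pre_solution table languages preference) ∧ (Dom_solution (pvRaiseWitness_solution.1) (pvRaiseWitness_solution.2.1) (pvRaiseWitness_solution.2.2) ∧ Raises_solution (pvRaiseWitness_solution.1) (pvRaiseWitness_solution.2.1) (pvRaiseWitness_solution.2.2) ∧ solution_alt (pvRaiseWitness_solution.1) (pvRaiseWitness_solution.2.1) (pvRaiseWitness_solution.2.2) = pvRaiseWitnessOut_solution)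

-- ===== LEMMAS AND PROOFS =====

-- the lexicographic sort key (-score, job) of A as one linearly ordered key
def pvKey (x : String × Int) : Lex (Int × String) := toLex (-x.2, x.1)

theorem pvKey_inj {a b : String × Int} (h : pvKey a = pvKey b) : a = b := by
  have h' := congrArg ofLex h
  simp only [pvKey, ofLex_toLex, Prod.mk.injEq] at h'
  exact Prod.ext h'.2 (by omega)

theorem pvKey_before_eq :
    (fun (a b : String × Int) => decide (-a.2 < -b.2) || (!decide (-b.2 < -a.2) && decide (a.1 < b.1)))
    = (fun a b => decide (pvKey a < pvKey b)) := by
  funext a b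
  simp only [pvKey, Prod.Lex.lt_iff, ofLex_toLex]
  by_cases h1 : -a.2 < -b.2 <;> by_cases h2 : -b.2 < -a.2 <;> by_cases h3 : a.1 < b.1 <;>
    simp [h1, h2, h3] <;> omega

-- sorted2 with keys (-score) and job IS sorted with the single lex key pvKey
theorem pv_sorted2_eq (ys : List (String × Int)) :
    PySem.List.sorted2 ys (fun x => -x.2) (fun x => x.1) = PySem.List.sorted ys pvKey := by
  rw [PySem.List.sorted_eq_foldl_insertBy]
  unfold PySem.List.sorted2
  simp only [pvKey_before_eq, Bool.false_eq_true, if_false]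

-- B's total update step once a best exists
def pvUpd (b y : String × Int) : String × Int :=
  if y.2 > b.2 ∨ (y.2 = b.2 ∧ y.1 < b.1) then y else b

theorem pvUpd_lt_iff (b y : String × Int) :
    (y.2 > b.2 ∨ (y.2 = b.2 ∧ y.1 < b.1)) ↔ pvKey y < pvKey b := by
  simp only [pvKey, Prod.Lex.lt_iff, ofLex_toLex]
  constructor
  · rintro (h | ⟨h1, h2⟩)
    · exact Or.inl (by omega)
    · exact Or.inr ⟨by omega, h2⟩
  · rintro (h | ⟨h1, h2⟩)
    · exact Or.inl (by omega)
    · exact Or.inr ⟨by omega, h2⟩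

theorem pvUpd_le_left (b y : String × Int) : pvKey (pvUpd b y) ≤ pvKey b := by
  unfold pvUpd; split
  · exact le_of_lt ((pvUpd_lt_iff b y).mp (by assumption))
  · exact le_refl _

theorem pvUpd_le_right (b y : String × Int) : pvKey (pvUpd b y) ≤ pvKey y := by
  unfold pvUpd; split
  · exact le_refl _
  · rename_i h
    have := (pvUpd_lt_iff b y).not.mp h
    exact le_of_not_gt (by simpa using this)

theorem pv_foldl_step_some (ys : List (String × Int)) (b : String × Int) :
    ys.foldl (fun (best : Option (String × Int)) y =>
      match best with
      | none => some y
      | some b => if y.2 > b.2 ∨ (y.2 = b.2 ∧ y.1 < b.1) then some y else some b) (some b)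
    = some (ys.foldl pvUpd b) := by
  induction ys generalizing b with
  | nil => rfl
  | cons y t ih =>
    simp only [List.foldl_cons]
    rw [show (if y.2 > b.2 ∨ (y.2 = b.2 ∧ y.1 < b.1) then some y else some b) = some (pvUpd b y) by
      unfold pvUpd; split <;> rfl]
    exact ih (pvUpd b y)

theorem pv_foldl_pvUpd_min (ys : List (String × Int)) (b : String × Int) :
    (ys.foldl pvUpd b = b ∨ ys.foldl pvUpd b ∈ ys) ∧
    pvKey (ys.foldl pvUpd b) ≤ pvKey b ∧
    ∀ y ∈ ys, pvKey (ys.foldl pvUpd b) ≤ pvKey y := by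
  induction ys generalizing b with
  | nil => exact ⟨Or.inl rfl, le_refl _, by simp⟩
  | cons y t ih =>
    obtain ⟨hmem, hle, hall⟩ := ih (pvUpd b y)
    simp only [List.foldl_cons]
    refine ⟨?_, le_trans hle (pvUpd_le_left b y), ?_⟩
    · rcases hmem with h | h
      · rw [h]; unfold pvUpd; split
        · exact Or.inr (List.mem_cons_self)
        · exact Or.inl rfl
      · exact Or.inr (List.mem_cons_of_mem _ h)
    · intro z hz
      rcases List.mem_cons.mp hz with h | h
      · subst h; exact le_trans hle (pvUpd_le_right b z)
      · exact hall z h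

theorem pv_rowscore_zeros (words : List String) (ls : List String) (acc : Int) :
    (List.range ls.length).foldl (fun a k =>
      let l := ls.getD k ""
      if words.contains l then
        a + (6 - ((PySem.List.index? words l).getD 0 : Int)) * ([] : List Int).getD k 0
      else a) acc = acc := by
  induction ls.length generalizing acc with
  | zero => rfl
  | succ n ih =>
    rw [List.range_succ, List.foldl_append]
    simp only [List.foldl_cons, List.foldl_nil]
    split <;> simp

-- the per-row score: A's index loop over languages = B's loop over zip(languages, preference)
theorem pv_rowscore (words : List String) (ls : List String) (ps : List Int) (acc : Int) :
    (List.range ls.length).foldl (fun a k =>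
      let l := ls.getD k ""
      if words.contains l then
        a + (6 - ((PySem.List.index? words l).getD 0 : Int)) * ps.getD k 0
      else a) acc
    = (ls.zip ps).foldl (fun a (lp : String × Int) =>
      if words.contains lp.1 then
        a + (6 - ((PySem.List.index? words lp.1).getD 0 : Int)) * lp.2
      else a) acc := by
  induction ls generalizing ps acc with
  | nil => simp
  | cons l t ih =>
    cases ps with
    | nil =>
      simp only [List.zip_nil_right, List.foldl_nil]
      exact pv_rowscore_zeros words (l :: t) acc
    | cons p pt =>
      simp only [List.length_cons, List.range_succ_eq_map, List.foldl_cons, List.foldl_map,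
        List.getD_cons_zero, List.getD_cons_succ, List.zip_cons_cons]
      exact ih pt _

-- ===== VERDICT (by name: the statement is the Claim_ definition above) =====
-- B's per-row computation, word-level
def pvG (languages : List String) (preference : List Int) (row : String) : String × Int :=
  ((PySem.List.pyGet? (pvSplit row) 0).getD "",
    (languages.zip preference).foldl (fun acc (lp : String × Int) =>
      if (pvSplit row).contains lp.1 then
        acc + (6 - ((PySem.List.index? (pvSplit row) lp.1).getD 0 : Int)) * lp.2
      else acc) 0)

-- A's inner index loop over languages computes B's zip loop
theorem pv_inner_eq (languages : List String) (preference : List Int) (lang : List String) :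
    (PySem.List.pyRange 0 (languages.length : Int) 1).foldl (fun js i =>
      let l := PySem.List.pyGetD languages i ""
      if lang.contains l then
        js + (6 - ((PySem.List.index? lang l).getD 0 : Int)) * PySem.List.pyGetD preference i 0
      else js) 0
    = (languages.zip preference).foldl (fun acc (lp : String × Int) =>
      if lang.contains lp.1 then
        acc + (6 - ((PySem.List.index? lang lp.1).getD 0 : Int)) * lp.2
      else acc) 0 := by
  rw [PySem.List.pyRange_one]
  simp only [Int.sub_zero, Int.toNat_natCast, List.foldl_map, zero_add, PySem.List.pyGetD_natCast]
  exact pv_rowscore lang languages preference 0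

theorem solution_spec : Claim_equal_solution := by
  intro table languages preference _ hpre
  obtain ⟨htne, -⟩ := hpre
  unfold Spec_solution solution solution_alt
  simp only [PySem.List.foldl_append_singleton_eq_map, List.nil_append, List.foldl_map,
    pv_inner_eq]
  rw [pv_sorted2_eq]
  -- name both sides' common per-row value pvG
  have hys : (table.map (fun x => ((PySem.List.pyGet? (pvSplit x) 0).getD "",
      List.foldl (fun acc (lp : String × Int) =>
        if (pvSplit x).contains lp.1 then
          acc + (6 - ((PySem.List.index? (pvSplit x) lp.1).getD 0 : Int)) * lp.2
        else acc) 0 (languages.zip preference))))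
      = table.map (pvG languages preference) := rfl
  rw [hys]
  have hB : List.foldl (fun (best : Option (String × Int)) (row : String) =>
      match best with
      | none => some ((PySem.List.pyGet? (pvSplit row) 0).getD "",
          List.foldl (fun acc (lp : String × Int) =>
            if (pvSplit row).contains lp.1 then
              acc + (6 - ((PySem.List.index? (pvSplit row) lp.1).getD 0 : Int)) * lp.2
            else acc) 0 (languages.zip preference))
      | some b =>
        if List.foldl (fun acc (lp : String × Int) =>
            if (pvSplit row).contains lp.1 then
              acc + (6 - ((PySem.List.index? (pvSplit row) lp.1).getD 0 : Int)) * lp.2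
            else acc) 0 (languages.zip preference) > b.2 ∨
          (List.foldl (fun acc (lp : String × Int) =>
            if (pvSplit row).contains lp.1 then
              acc + (6 - ((PySem.List.index? (pvSplit row) lp.1).getD 0 : Int)) * lp.2
            else acc) 0 (languages.zip preference) = b.2 ∧
            (PySem.List.pyGet? (pvSplit row) 0).getD "" < b.1)
        then some ((PySem.List.pyGet? (pvSplit row) 0).getD "",
          List.foldl (fun acc (lp : String × Int) =>
            if (pvSplit row).contains lp.1 then
              acc + (6 - ((PySem.List.index? (pvSplit row) lp.1).getD 0 : Int)) * lp.2
            else acc) 0 (languages.zip preference))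
        else some b) none table
      = (table.map (pvG languages preference)).foldl (fun (best : Option (String × Int)) y =>
        match best with
        | none => some y
        | some b => if y.2 > b.2 ∨ (y.2 = b.2 ∧ y.1 < b.1) then some y else some b) none := by
    rw [List.foldl_map]
    rfl
  rw [hB]
  -- the mapped table is nonempty
  obtain ⟨y, t, hyt⟩ : ∃ y t, table.map (pvG languages preference) = y :: t := by
    cases h : table.map (pvG languages preference) with
    | nil => exact absurd (List.map_eq_nil_iff.mp h) htne
    | cons a b => exact ⟨a, b, rfl⟩
  rw [hyt]
  simp only [List.foldl_cons]
  rw [pv_foldl_step_some]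
  cases hs : PySem.List.sorted (y :: t) pvKey with
  | nil =>
    exfalso
    have hl := PySem.List.length_sorted (y :: t) pvKey false
    rw [hs] at hl
    simp at hl
  | cons m t' =>
    obtain ⟨hmem, hleb, hall⟩ := pv_foldl_pvUpd_min t y
    have hr0mem : t.foldl pvUpd y ∈ y :: t := by
      rcases hmem with h | h
      · rw [h]; exact List.mem_cons_self
      · exact List.mem_cons_of_mem _ h
    have hmmem : m ∈ y :: t :=
      (PySem.List.sorted_perm (y :: t) pvKey false).mem_iff.mp (hs ▸ List.mem_cons_self)
    have h1 : pvKey m ≤ pvKey (t.foldl pvUpd y) :=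
      PySem.List.key_head_sorted_le (y :: t) pvKey hs _ hr0mem
    have h2 : pvKey (t.foldl pvUpd y) ≤ pvKey m := by
      rcases List.mem_cons.mp hmmem with h | h
      · rw [h]; exact hleb
      · exact hall m h
    rw [pvKey_inj (le_antisymm h1 h2)]
    simp [PySem.List.pyGet?, PySem.List.pyIdx?]

theorem solution_raises : Claim_raises_solution := by
  unfold Claim_raises_solution
  constructor
  · rintro table languages preference _ ⟨ht, l, hl, row, hrow, hmem⟩ ⟨_, hpre⟩
    exact hpre l hl row hrow hmem
  · exact ⟨by decide, by decide, by decide⟩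

-- self-check: the raise witness indeed falls outside Pre_solution
theorem pvRaiseWitness_ok : ¬ Pre_solution (pvRaiseWitness_solution.1) (pvRaiseWitness_solution.2.1) (pvRaiseWitness_solution.2.2) :=
  solution_raises.1 _ _ _ solution_raises.2.1 solution_raises.2.2.1
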